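-- pv_equiv track=rewrite | github.com/srigas/MTAD-GAT-mlflow | streamlit/streamlit_utils.py | create_anom_range
-- ===== SOURCE A (Python) =====
-- def create_anom_range(xs, anoms):
--     """Function that creates ranges of anomalies
--     :param xs: list of indices to be used for the plot, auto generated by anoms_to_indices
--     :param anoms: indices that belong in xs and correspond to anomalies
--     """
--     anomaly_ranges = []
--     for anom in anoms:
--         idx = xs.index(anom)
--         if anomaly_ranges and anomaly_ranges[-1][-1] == idx-1:
--             anomaly_ranges[-1] = (anomaly_ranges[-1][0], idx)
--         else:
--             anomaly_ranges.append((idx, idx))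
--     return anomaly_ranges
-- ===== SOURCE B (Python) =====
-- from itertools import groupby
--
-- def create_anom_range(xs, anoms):
--     """Group the positions of anoms in xs into contiguous (start, end) ranges."""
--     idxs = [xs.index(a) for a in anoms]
--     ranges = []
--     for _, grp in groupby(enumerate(idxs), key=lambda p: p[1] - p[0]):
--         g = [i for _, i in grp]
--         ranges.append((g[0], g[-1]))
--     return ranges
-- ===== Notes on version B (the rewrite author's own statement) =====
-- stated objective: idiomatic
-- what changed: Replaces A's mutate-the-last-appended-range state machine with a precomputed index list grouped into runs by the standard itertools.groupby difference-key idiom.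
import Mathlib
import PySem

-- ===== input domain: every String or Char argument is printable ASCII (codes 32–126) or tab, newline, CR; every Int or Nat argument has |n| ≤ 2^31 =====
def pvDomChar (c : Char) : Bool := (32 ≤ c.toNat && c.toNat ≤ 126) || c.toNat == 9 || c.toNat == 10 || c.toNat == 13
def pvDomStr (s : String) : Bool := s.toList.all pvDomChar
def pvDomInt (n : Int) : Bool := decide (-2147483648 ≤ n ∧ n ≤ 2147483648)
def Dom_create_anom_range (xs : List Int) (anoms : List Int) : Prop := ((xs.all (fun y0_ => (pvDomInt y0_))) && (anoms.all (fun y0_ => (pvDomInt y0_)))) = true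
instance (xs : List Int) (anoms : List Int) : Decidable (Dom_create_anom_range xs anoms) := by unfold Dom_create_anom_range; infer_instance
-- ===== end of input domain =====

-- B replaces A's mutate-the-last-range state machine by an index list grouped into consecutive runs (idiomatic groupby decomposition); same cost.


-- ===== PORT A =====
-- one step of A's loop body: peek at the last appended range and either extend it or append a fresh one
def craStep (acc : List (Int × Int)) (idx : Int) : List (Int × Int) :=
  match acc.getLast? with
  | some (a, b) => if b = idx - 1 then acc.dropLast ++ [(a, idx)] else acc ++ [(idx, idx)]
  | none => [(idx, idx)]

-- xs.index(anom) raises ValueError when anom ∉ xs; Pre_ excludes that, the 'none' branch is unreachable there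
def create_anom_range (xs : List Int) (anoms : List Int) : List (Int × Int) :=
  anoms.foldl (fun acc anom =>
    match PySem.List.index? xs anom with
    | some i => craStep acc (i : Int)
    | none => acc) []

-- ===== PORT B =====
-- the groupby(enumerate(idxs), key = idx - pos) pass: a run continues exactly while each idx is the previous + 1
def craRuns (first last : Int) (rest : List Int) : List (Int × Int) :=
  match rest with
  | [] => [(first, last)]
  | y :: t => if y = last + 1 then craRuns first y t else (first, last) :: craRuns y y t

def create_anom_range_alt (xs : List Int) (anoms : List Int) : List (Int × Int) :=
  let idxs := anoms.map (fun a => ((PySem.List.index? xs a).getD 0 : Int))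
  match idxs with
  | [] => []
  | x :: t => craRuns x x t

-- ===== PRECONDITION & SPEC =====
-- Pre_ excludes exactly the inputs where xs.index(anom) raises ValueError (an anomaly not present in xs)
def Pre_create_anom_range (xs : List Int) (anoms : List Int) : Prop := ∀ a ∈ anoms, a ∈ xs
instance (xs : List Int) (anoms : List Int) : Decidable (Pre_create_anom_range xs anoms) := by unfold Pre_create_anom_range; infer_instance
def pvWitness_create_anom_range : List Int × List Int := ([3, 4, 5, 9], [4, 5, 9])

def Spec_create_anom_range (xs : List Int) (anoms : List Int) (out : List (Int × Int)) : Prop := out = create_anom_range_alt xs anoms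
instance (xs : List Int) (anoms : List Int) (out : List (Int × Int)) : Decidable (Spec_create_anom_range xs anoms out) := by unfold Spec_create_anom_range; infer_instance

-- ===== CLAIM (what is proved, stated in full; the proofs are below) =====
def Claim_equal_create_anom_range : Prop := ∀ (xs : List Int) (anoms : List Int), Dom_create_anom_range xs anoms → Pre_create_anom_range xs anoms → Spec_create_anom_range xs anoms (create_anom_range xs anoms)

-- ===== LEMMAS AND PROOFS =====

-- A's fold, with a nonempty accumulator split as acc ++ [(first,last)], computes acc ++ the runs of the remaining indices
theorem craStep_runs (l : List Int) : ∀ (first last : Int) (acc : List (Int × Int)),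
    l.foldl craStep (acc ++ [(first, last)]) = acc ++ craRuns first last l := by
  induction l with
  | nil => intro first last acc; simp [craRuns]
  | cons y t ih =>
    intro first last acc
    simp only [List.foldl_cons, craStep, List.getLast?_append, Option.some_or,
      List.getLast?_singleton, craRuns]
    by_cases h : last = y - 1
    · have hy : y = last + 1 := by omega
      rw [if_pos h, if_pos hy, List.dropLast_concat, ih]
    · have hy : ¬ y = last + 1 := by omega
      rw [if_neg h, if_neg hy,
        show acc ++ [(first, last)] ++ [(y, y)] = (acc ++ [(first, last)]) ++ [(y, y)] from by simp,
        ih y y (acc ++ [(first, last)])]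
      simp

-- under Pre_, every index? lookup hits; A's fold over anoms is the pure fold craStep over the mapped index list
theorem foldA_map (xs : List Int) (anoms : List Int) (h : ∀ a ∈ anoms, a ∈ xs) :
    ∀ acc, anoms.foldl (fun acc anom =>
      match PySem.List.index? xs anom with
      | some i => craStep acc (i : Int)
      | none => acc) acc
    = (anoms.map (fun a => ((PySem.List.index? xs a).getD 0 : Int))).foldl craStep acc := by
  induction anoms with
  | nil => intro acc; simp
  | cons a t ih =>
    intro acc
    have hmem : a ∈ xs := h a (List.mem_cons_self)
    have hsome : (PySem.List.index? xs a).isSome := by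
      rw [PySem.List.index?_eq_idxOf?]; simpa using hmem
    obtain ⟨i, hi⟩ := Option.isSome_iff_exists.mp hsome
    simp only [List.foldl_cons, List.map_cons, hi, Option.getD_some]
    exact ih (fun b hb => h b (List.mem_cons_of_mem _ hb)) _

theorem create_anom_range_spec : Claim_equal_create_anom_range := by
  intro xs anoms _ hpre
  unfold Spec_create_anom_range create_anom_range create_anom_range_alt
  rw [foldA_map xs anoms hpre]
  cases hm : anoms.map (fun a => ((PySem.List.index? xs a).getD 0 : Int)) with
  | nil => simp
  | cons x t =>
    simp only
    have : craStep [] x = [] ++ [(x, x)] := by simp [craStep]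
    rw [List.foldl_cons, this, craStep_runs t x x []]
    simp
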